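-- pv_equiv track=rewrite | github.com/zuriyaAnsbacher/gramm | GR_code/GG_GRAMM/code/chroms_to_GL.py | gl_cartesian_product_1empty
-- ===== SOURCE A (Python) =====
-- import itertools
--
-- def gl_cartesian_product_1empty(c, al_types):
--     lst_options = []
--     gl_options = []
--     for types in al_types:
--         al_lst = []
--         for al in c[types]:
--             al_lst.append(al)
--         lst_options.append(al_lst)
--     for op in itertools.product(*lst_options):
--         op_lst = []
--         for al in op:
--             al1 = str(al) + "+" + str(al)
--             op_lst.append(al1)
--         gl_options.append(op_lst)
--     return gl_options
-- ===== SOURCE B (Python) =====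
-- def gl_cartesian_product_1empty(c, al_types):
--     # Precompute per type the formatted strings, then build the product by accumulation.
--     formatted = [[al + "+" + al for al in c[t]] for t in al_types]
--     result = [[]]
--     for flist in formatted:
--         result = [partial + [s] for partial in result for s in flist]
--     return result
-- ===== Notes on version B (the rewrite author's own statement) =====
-- stated objective: simpler
-- what changed: B formats each allele once per type before combining and builds the cartesian product by iterative accumulation of growing partial lists, instead of collecting raw allele lists, calling itertools.product and formatting every element of every tuple afterwards.
import Mathlib
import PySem

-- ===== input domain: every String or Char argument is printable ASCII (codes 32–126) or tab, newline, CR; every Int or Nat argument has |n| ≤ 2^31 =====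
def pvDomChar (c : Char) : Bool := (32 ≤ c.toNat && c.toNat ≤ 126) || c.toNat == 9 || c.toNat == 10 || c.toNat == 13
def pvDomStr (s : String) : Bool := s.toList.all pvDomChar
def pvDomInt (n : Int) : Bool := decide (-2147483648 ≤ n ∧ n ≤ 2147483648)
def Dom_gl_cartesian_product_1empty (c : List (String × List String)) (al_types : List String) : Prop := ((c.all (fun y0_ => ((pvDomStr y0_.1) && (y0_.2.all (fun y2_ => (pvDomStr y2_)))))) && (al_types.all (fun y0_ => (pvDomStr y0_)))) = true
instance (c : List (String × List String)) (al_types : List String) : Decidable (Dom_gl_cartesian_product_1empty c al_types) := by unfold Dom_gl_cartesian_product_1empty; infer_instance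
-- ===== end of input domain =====

-- B formats each allele once per type and builds the cartesian product by iterative
-- accumulation of growing partials, instead of itertools.product followed by per-tuple
-- formatting (objective: simpler).

-- ===== PORT A =====
-- itertools.product(*lst_options): rightmost varies fastest
def pvProduct : List (List String) → List (List String)
  | [] => [[]]
  | l :: ls => l.flatMap (fun x => (pvProduct ls).map (fun q => x :: q))

def gl_cartesian_product_1empty (c : List (String × List String)) (al_types : List String) : List (List String) :=
  -- for types in al_types: al_lst = copy of c[types]; lst_options.append(al_lst)
  let lst_options := al_types.map (fun t => ((PySem.Dict.mk c).get? t).getD [])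
  -- for op in product(*lst_options): format each element of op
  (pvProduct lst_options).map (fun op => op.map (fun al => al ++ "+" ++ al))

-- ===== PORT B =====
def gl_cartesian_product_1empty_alt (c : List (String × List String)) (al_types : List String) : List (List String) :=
  let formatted := al_types.map (fun t => (((PySem.Dict.mk c).get? t).getD []).map (fun al => al ++ "+" ++ al))
  formatted.foldl (fun result flist => result.flatMap (fun partial_ => flist.map (fun s => partial_ ++ [s]))) [[]]

-- ===== PRECONDITION & SPEC =====
-- Pre_ excludes inputs where some requested type is not a key of c: there Python A
-- (c[types]) raises KeyError, returning no value.
def Pre_gl_cartesian_product_1empty (c : List (String × List String)) (al_types : List String) : Prop :=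
  ∀ t ∈ al_types, t ∈ c.map Prod.fst
instance (c : List (String × List String)) (al_types : List String) : Decidable (Pre_gl_cartesian_product_1empty c al_types) := by unfold Pre_gl_cartesian_product_1empty; infer_instance

def pvWitness_gl_cartesian_product_1empty : (List (String × List String)) × List String :=
  ([("a", ["x", "y"]), ("b", ["u"])], ["a", "b"])

def Spec_gl_cartesian_product_1empty (c : List (String × List String)) (al_types : List String) (out : List (List String)) : Prop := out = gl_cartesian_product_1empty_alt c al_types
instance (c : List (String × List String)) (al_types : List String) (out : List (List String)) : Decidable (Spec_gl_cartesian_product_1empty c al_types out) := by unfold Spec_gl_cartesian_product_1empty; infer_instance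

-- ===== CLAIM =====
def Claim_equal_gl_cartesian_product_1empty : Prop := ∀ (c : List (String × List String)) (al_types : List String), Dom_gl_cartesian_product_1empty c al_types → Pre_gl_cartesian_product_1empty c al_types → Spec_gl_cartesian_product_1empty c al_types (gl_cartesian_product_1empty c al_types)

-- ===== LEMMAS AND PROOFS =====

-- Mapping a function over every element commutes with the product.
theorem pvProduct_map (f : String → String) (ls : List (List String)) :
    pvProduct (ls.map (fun l => l.map f)) = (pvProduct ls).map (fun op => op.map f) := by
  induction ls with
  | nil => rfl
  | cons l ls ih =>
    simp [pvProduct, ih, List.flatMap_map, List.map_flatMap, Function.comp_def]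

-- The accumulation loop appends each product tuple to every partial.
theorem foldl_prod (fls : List (List String)) (acc : List (List String)) :
    fls.foldl (fun result flist => result.flatMap (fun p => flist.map (fun s => p ++ [s]))) acc
      = acc.flatMap (fun p => (pvProduct fls).map (fun q => p ++ q)) := by
  induction fls generalizing acc with
  | nil => simp [pvProduct]
  | cons l ls ih =>
    simp only [List.foldl_cons, ih, pvProduct]
    simp [List.flatMap_map, List.map_flatMap, List.flatMap_assoc, Function.comp_def]

-- ===== VERDICT =====
theorem gl_cartesian_product_1empty_spec : Claim_equal_gl_cartesian_product_1empty := by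
  intro c al_types _ _
  unfold Spec_gl_cartesian_product_1empty gl_cartesian_product_1empty gl_cartesian_product_1empty_alt
  rw [show (al_types.map (fun t => (((PySem.Dict.mk c).get? t).getD []).map (fun al => al ++ "+" ++ al)))
        = (al_types.map (fun t => ((PySem.Dict.mk c).get? t).getD [])).map (fun l => l.map (fun al => al ++ "+" ++ al)) by
      simp]
  rw [foldl_prod, pvProduct_map]
  simp
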